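-- pv_equiv track=rewrite | github.com/jiannazzone/Advent-of-Code | Day03/main.py | deliverPresents
-- ===== SOURCE A (Python) =====
-- def deliverPresents(data):
--     # Houses will be stored as a dictionary: "x,y":numPresents
--     visitedHouses = { "0,0": 1 }
--
--     # Track our locations
--     currentX = 0
--     currentY = 0
--
--     # Loop through the commands.
--     # If the house is new, add it to visitedHouses
--     # If the house already exists, add another present
--     for step in data:
--         # Process the step
--         if step == "^":
--             currentY += 1
--         elif step == "v":
--             currentY -= 1
--         elif step == ">":
--             currentX += 1
--         elif step == "<":
--             currentX -= 1
--
--         # Check to see if the house exists in the dictionary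
--         if f'{currentX},{currentY}' in visitedHouses.keys():
--             visitedHouses[f'{currentX},{currentY}'] += 1
--         else:
--             visitedHouses[f'{currentX},{currentY}'] = 1
--     return visitedHouses
-- ===== SOURCE B (Python) =====
-- def deliverPresents(data):
--     # Coordinates as two running-sum lists driven by move-vector tables
--     # (unknown characters contribute (0, 0), as in the original).
--     DX = {'>': 1, '<': -1}
--     DY = {'^': 1, 'v': -1}
--     xs = [0]
--     ys = [0]
--     for c in data:
--         xs.append(xs[-1] + DX.get(c, 0))
--         ys.append(ys[-1] + DY.get(c, 0))
--     houses = ['{},{}'.format(x, y) for x, y in zip(xs, ys)]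
--     # One count() scan per distinct house, in first-visit order.
--     return {h: houses.count(h) for h in dict.fromkeys(houses)}
-- ===== Notes on version B (the rewrite author's own statement) =====
-- stated objective: alternative
-- what changed: B drops A's inline dict-membership walk entirely: it drives the coordinates with move-vector lookup tables as two running-sum lists, zips them into house keys, and builds the result with one count() scan per distinct house (dict.fromkeys order) instead of maintaining counts incrementally in a dict.
import Mathlib
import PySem

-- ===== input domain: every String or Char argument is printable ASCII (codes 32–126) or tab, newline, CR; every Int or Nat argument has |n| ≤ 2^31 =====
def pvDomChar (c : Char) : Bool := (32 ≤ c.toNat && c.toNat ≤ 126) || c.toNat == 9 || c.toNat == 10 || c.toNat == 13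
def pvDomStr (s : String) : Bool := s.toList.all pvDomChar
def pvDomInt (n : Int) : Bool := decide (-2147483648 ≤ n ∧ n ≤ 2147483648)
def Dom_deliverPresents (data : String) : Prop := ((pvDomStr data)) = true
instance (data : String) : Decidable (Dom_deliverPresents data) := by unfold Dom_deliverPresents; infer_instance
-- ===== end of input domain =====

-- B replaces A's inline dict-membership walk by move-vector tables, two coordinate
-- running-sum lists, zip-to-keys, and one count() scan per distinct house (alternative algorithm).


-- ===== PORT A =====
def dpMove (c : Char) (x y : Int) : Int × Int :=
  if c = '^' then (x, y + 1)
  else if c = 'v' then (x, y - 1)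
  else if c = '>' then (x + 1, y)
  else if c = '<' then (x - 1, y)
  else (x, y)

-- f'{x},{y}'
def dpKey (x y : Int) : String := PySem.Int.toStr x ++ "," ++ PySem.Int.toStr y

def dpStepA (st : PySem.Dict String Int × Int × Int) (c : Char) :
    PySem.Dict String Int × Int × Int :=
  let p := dpMove c st.2.1 st.2.2
  let k := dpKey p.1 p.2
  let d := st.1
  (if d.contains k then d.insert k (d.getD k 0 + 1) else d.insert k 1, p.1, p.2)

def deliverPresents (data : String) : List (String × Int) :=
  ((data.toList.foldl dpStepA (PySem.Dict.ofList [("0,0", 1)], 0, 0)).1).items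

-- ===== PORT B =====
-- DX = {'>': 1, '<': -1};  DY = {'^': 1, 'v': -1}
def dpDX : PySem.Dict Char Int := PySem.Dict.ofList [('>', 1), ('<', -1)]
def dpDY : PySem.Dict Char Int := PySem.Dict.ofList [('^', 1), ('v', -1)]

def deliverPresents_alt (data : String) : List (String × Int) :=
  -- xs.append(xs[-1] + DX.get(c, 0)) (resp. ys)
  let xs := data.toList.foldl
    (fun xs c => xs ++ [PySem.List.pyGetD xs (-1) 0 + dpDX.getD c 0]) [(0 : Int)]
  let ys := data.toList.foldl
    (fun ys c => ys ++ [PySem.List.pyGetD ys (-1) 0 + dpDY.getD c 0]) [(0 : Int)]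
  -- houses = ['{},{}'.format(x, y) for x, y in zip(xs, ys)]
  let houses := (xs.zip ys).map (fun p => PySem.Int.toStr p.1 ++ "," ++ PySem.Int.toStr p.2)
  -- {h: houses.count(h) for h in dict.fromkeys(houses)}
  ((PySem.List.dedup houses).foldl
      (fun d h => d.insert h ((houses.count h : Nat) : Int)) PySem.Dict.empty).items

-- ===== PRECONDITION & SPEC =====
def Spec_deliverPresents (data : String) (out : List (String × Int)) : Prop := out = deliverPresents_alt data
instance (data : String) (out : List (String × Int)) : Decidable (Spec_deliverPresents data out) := by unfold Spec_deliverPresents; infer_instance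

-- ===== CLAIM (what is proved, stated in full; the proofs are below) =====
def Claim_equal_deliverPresents : Prop := ∀ (data : String), Dom_deliverPresents data → Spec_deliverPresents data (deliverPresents data)

-- ===== LEMMAS AND PROOFS =====

-- the key sequence of the walk (proof-side abstraction shared by both reductions)
def dpWalk (cs : List Char) (x y : Int) : List String :=
  match cs with
  | [] => []
  | c :: cs =>
      let p := dpMove c x y
      dpKey p.1 p.2 :: dpWalk cs p.1 p.2

-- running coordinates along one axis (proof-side)
def dpCoords (f : Char → Int) (cs : List Char) (x : Int) : List Int :=
  match cs with
  | [] => []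
  | c :: cs => (x + f c) :: dpCoords f cs (x + f c)

theorem dpGetD_last (l : List Int) (x : Int) :
    PySem.List.pyGetD (l ++ [x]) (-1) 0 = x := by
  simp [PySem.List.pyGetD, PySem.List.pyGet?, PySem.List.pyIdx?]

theorem dpFold_coords (f : Char → Int) (cs : List Char) :
    ∀ (l : List Int) (x : Int),
      cs.foldl (fun xs c => xs ++ [PySem.List.pyGetD xs (-1) 0 + f c]) (l ++ [x]) =
        (l ++ [x]) ++ dpCoords f cs x := by
  induction cs with
  | nil => simp [dpCoords]
  | cons c cs ih =>
      intro l x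
      simp only [List.foldl_cons, dpGetD_last]
      rw [ih (l ++ [x]) (x + f c)]
      simp [dpCoords]

theorem dpDX_getD (c : Char) :
    dpDX.getD c 0 = if c = '>' then 1 else if c = '<' then -1 else 0 := by
  by_cases h3 : c = '>'
  · subst h3; decide
  · by_cases h4 : c = '<'
    · subst h4; decide
    · have h : dpDX.getD c 0 = 0 := by
        simp [dpDX, PySem.Dict.ofList, PySem.Dict.update, PySem.Dict.insert, PySem.Dict.empty,
          PySem.Dict.getD_eq_get?_getD, PySem.Dict.get?, PySem.Dict.contains,
          Ne.symm h3, Ne.symm h4]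
      simp [h, h3, h4]

theorem dpDY_getD (c : Char) :
    dpDY.getD c 0 = if c = '^' then 1 else if c = 'v' then -1 else 0 := by
  by_cases h3 : c = '^'
  · subst h3; decide
  · by_cases h4 : c = 'v'
    · subst h4; decide
    · have h : dpDY.getD c 0 = 0 := by
        simp [dpDY, PySem.Dict.ofList, PySem.Dict.update, PySem.Dict.insert, PySem.Dict.empty,
          PySem.Dict.getD_eq_get?_getD, PySem.Dict.get?, PySem.Dict.contains,
          Ne.symm h3, Ne.symm h4]
      simp [h, h3, h4]

theorem dpMove_eq (c : Char) (x y : Int) :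
    dpMove c x y = (x + dpDX.getD c 0, y + dpDY.getD c 0) := by
  rw [dpDX_getD, dpDY_getD]
  unfold dpMove
  split_ifs <;> simp_all <;> omega

theorem dpZip_walk (cs : List Char) :
    ∀ (x y : Int),
      ((dpCoords (fun c => dpDX.getD c 0) cs x).zip
        (dpCoords (fun c => dpDY.getD c 0) cs y)).map
          (fun p => PySem.Int.toStr p.1 ++ "," ++ PySem.Int.toStr p.2) =
        dpWalk cs x y := by
  induction cs with
  | nil => intro x y; simp [dpCoords, dpWalk]
  | cons c cs ih =>
      intro x y
      simp only [dpCoords, dpWalk, List.zip_cons_cons, List.map_cons, dpMove_eq, dpKey]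
      exact congrArg _ (ih _ _)

-- A's branch is one dict-counting bump
theorem dpBump_eq (d : PySem.Dict String Int) (k : String) :
    (if d.contains k then d.insert k (d.getD k 0 + 1) else d.insert k 1) =
      d.insert k (d.getD k 0 + 1) := by
  by_cases h : d.contains k = true
  · simp [h]
  · simp only [Bool.not_eq_true] at h
    rw [if_neg (by simp [h]), PySem.Dict.getD_of_not_contains _ _ h]
    norm_num

-- A's dict after the walk = tallying the walk's key sequence onto the start dict
theorem dpA_eq_tally (cs : List Char) :
    ∀ (x y : Int) (d : PySem.Dict String Int),
      (cs.foldl dpStepA (d, x, y)).1 =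
        (dpWalk cs x y).foldl (fun d k => d.insert k (d.getD k 0 + 1)) d := by
  induction cs with
  | nil => intro x y d; simp [dpWalk]
  | cons c cs ih =>
      intro x y d
      simp only [List.foldl_cons, dpStepA, dpWalk]
      rw [ih, dpBump_eq]

-- B's tally loop over the deduped list, itemized
theorem dpB_items (hs : List String) :
    ((PySem.List.dedup hs).foldl
        (fun d h => d.insert h ((hs.count h : Nat) : Int)) PySem.Dict.empty).items =
      (PySem.List.dedup hs).map (fun h => (h, ((hs.count h : Nat) : Int))) := by
  rw [PySem.Dict.items_foldl_insert_fresh (PySem.List.dedup hs) (fun h => h)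
      (fun h => ((hs.count h : Nat) : Int)) PySem.Dict.empty
      (by intro a _; exact PySem.Dict.contains_empty a)
      (by simp)]
  simp [PySem.Dict.empty]

-- ===== VERDICT (by name: the statement is the Claim_ definition above) =====
theorem deliverPresents_spec : Claim_equal_deliverPresents := by
  intro data _
  show _ = _
  unfold deliverPresents deliverPresents_alt
  rw [dpA_eq_tally]
  have hx := dpFold_coords (fun c => dpDX.getD c 0) data.toList [] 0
  have hy := dpFold_coords (fun c => dpDY.getD c 0) data.toList [] 0
  simp only [List.nil_append] at hx hy
  rw [hx, hy]
  simp only [List.cons_append, List.nil_append, List.zip_cons_cons, List.map_cons]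
  rw [dpZip_walk, dpB_items]
  have hstart : PySem.Dict.ofList [("0,0", (1 : Int))] =
      (PySem.Dict.empty : PySem.Dict String Int).insert "0,0"
        ((PySem.Dict.empty : PySem.Dict String Int).getD "0,0" 0 + 1) := rfl
  rw [hstart]
  have hfold : (dpWalk data.toList 0 0).foldl (fun d k => d.insert k (d.getD k 0 + 1))
        ((PySem.Dict.empty : PySem.Dict String Int).insert "0,0"
          ((PySem.Dict.empty : PySem.Dict String Int).getD "0,0" 0 + 1)) =
      (("0,0" :: dpWalk data.toList 0 0).foldl
        (fun d k => d.insert k (d.getD k 0 + 1)) PySem.Dict.empty) := rfl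
  rw [hfold, PySem.Dict.foldl_insert_getD_add_one_eq_counter, PySem.Dict.items_counter]
  have h00 : (PySem.Int.toStr 0 ++ "," ++ PySem.Int.toStr 0 : String) = "0,0" := by decide
  rw [h00]
  simp
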